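-- pv_equiv track=rewrite | github.com/Prime0702/BTech | S5/Design and Analysis of Algorithms/LAB/lab 3/1.py | cross_subarray_sum
-- ===== SOURCE A (Python) =====
-- def  cross_subarray_sum(arr:list, low:int, mid:int, high:int)->tuple:
--     left_sum = -(float('inf'))
--     sum = 0
--     for i in range(mid,low-1,-1):
--         sum += arr[i]
--         if sum>left_sum:
--             left_sum = sum
--             max_left = i
--     right_sum = -(float('inf'))
--     sum = 0
--     for j in range(mid+1,high+1):
--         sum += arr[j]
--         if sum>right_sum:
--             right_sum = sum
--             max_right = j
--     return(max_left,max_right,left_sum+right_sum)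
-- ===== SOURCE B (Python) =====
-- def _best(vals, idxs):
--     # cumulative-sum table in scan order, then first-occurrence argmax
--     sums = []
--     t = 0
--     for v in vals:
--         t += v
--         sums.append(t)
--     b = max(sums)
--     return b, idxs[sums.index(b)]
--
-- def cross_subarray_sum(arr, low, mid, high):
--     li = list(range(mid, low - 1, -1))
--     rj = list(range(mid + 1, high + 1))
--     ls, ml = _best([arr[i] for i in li], li)
--     rs, mr = _best([arr[j] for j in rj], rj)
--     return (ml, mr, ls + rs)
-- ===== Notes on version B (the rewrite author's own statement) =====
-- stated objective: alternative
-- what changed: A fuses running sum, best sum and best index into one conditional-update loop per half; B instead materialises the cumulative-sum table for each half and selects with max() plus first-occurrence index(), a table-then-argmax decomposition of the same O(high-low) cost.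
import Mathlib
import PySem

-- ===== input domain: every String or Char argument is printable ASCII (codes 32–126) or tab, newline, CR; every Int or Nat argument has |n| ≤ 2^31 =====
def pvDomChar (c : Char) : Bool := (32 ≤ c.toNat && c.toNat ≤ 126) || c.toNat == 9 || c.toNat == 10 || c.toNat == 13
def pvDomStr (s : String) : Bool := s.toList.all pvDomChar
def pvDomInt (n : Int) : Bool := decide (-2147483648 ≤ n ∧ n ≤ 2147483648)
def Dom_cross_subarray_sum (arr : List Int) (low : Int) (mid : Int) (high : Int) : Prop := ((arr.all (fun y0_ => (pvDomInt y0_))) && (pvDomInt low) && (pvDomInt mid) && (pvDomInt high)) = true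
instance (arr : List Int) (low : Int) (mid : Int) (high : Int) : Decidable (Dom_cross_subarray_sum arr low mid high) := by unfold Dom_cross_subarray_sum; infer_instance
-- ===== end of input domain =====

-- B replaces A's fused conditional-update loops by cumulative-sum tables scanned with max/index (alternative decomposition, same cost).

-- ===== PORT A =====
-- A's loop body (shared by both of A's loops): state (sum, left_sum as Option Int — none models the initial -inf —, max index; the
-- third component starts at a sentinel 0 that is never returned under Pre_, where each loop runs at least once).
def pvStepA (arr : List Int) (st : Int × Option Int × Int) (i : Int) : Int × Option Int × Int :=
  let s := st.1 + PySem.List.pyGetD arr i 0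
  match st.2.1 with
  | none => (s, some s, i)
  | some b => if s > b then (s, some s, i) else (s, some b, st.2.2)

def cross_subarray_sum (arr : List Int) (low : Int) (mid : Int) (high : Int) : Int × Int × Int :=
  let L := (PySem.List.pyRange mid (low - 1) (-1)).foldl (pvStepA arr) (0, none, 0)
  let R := (PySem.List.pyRange (mid + 1) (high + 1) 1).foldl (pvStepA arr) (0, none, 0)
  (L.2.2, R.2.2, L.2.1.getD 0 + R.2.1.getD 0)

-- ===== PORT B =====
-- _best: cumulative-sum table (loop with append), then max and first-occurrence index.
-- The none branches are unreachable under Pre_ (Python's max/index raise on an empty table, excluded by Pre_).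
def pvSelect (sums : List Int) (idxs : List Int) : Int × Int :=
  match PySem.List.max? sums (fun y => y) with
  | none => (0, 0)
  | some b =>
    match PySem.List.index? sums b with
    | none => (0, 0)
    | some k => (b, PySem.List.pyGetD idxs (k : Int) 0)

def pvBestB (vals : List Int) (idxs : List Int) : Int × Int :=
  pvSelect ((vals.foldl (fun (p : Int × List Int) v => (p.1 + v, p.2 ++ [p.1 + v])) (0, ([] : List Int))).2) idxs

def cross_subarray_sum_alt (arr : List Int) (low : Int) (mid : Int) (high : Int) : Int × Int × Int :=
  let li := PySem.List.pyRange mid (low - 1) (-1)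
  let rj := PySem.List.pyRange (mid + 1) (high + 1) 1
  let lb := pvBestB (li.map (fun i => PySem.List.pyGetD arr i 0)) li
  let rb := pvBestB (rj.map (fun j => PySem.List.pyGetD arr j 0)) rj
  (lb.2, rb.2, lb.1 + rb.1)

-- ===== PRECONDITION & SPEC =====
-- Exactly the inputs on which Python A returns: both halves non-empty (else UnboundLocalError) and every accessed
-- index low..high a valid Python index of arr, negative indices wrapping from the end (else IndexError).
def Pre_cross_subarray_sum (arr : List Int) (low : Int) (mid : Int) (high : Int) : Prop :=
  low ≤ mid ∧ mid < high ∧ -(arr.length : Int) ≤ low ∧ high < (arr.length : Int)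
instance (arr : List Int) (low : Int) (mid : Int) (high : Int) : Decidable (Pre_cross_subarray_sum arr low mid high) := by unfold Pre_cross_subarray_sum; infer_instance

def pvWitness_cross_subarray_sum : List Int × Int × Int × Int := ([1, -2, 3], 0, 1, 2)

def Spec_cross_subarray_sum (arr : List Int) (low : Int) (mid : Int) (high : Int) (out : Int × Int × Int) : Prop := out = cross_subarray_sum_alt arr low mid high
instance (arr : List Int) (low : Int) (mid : Int) (high : Int) (out : Int × Int × Int) : Decidable (Spec_cross_subarray_sum arr low mid high out) := by unfold Spec_cross_subarray_sum; infer_instance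

-- ===== CLAIM (what is proved, stated in full; the proofs are below) =====
def Claim_equal_cross_subarray_sum : Prop := ∀ (arr : List Int) (low : Int) (mid : Int) (high : Int), Dom_cross_subarray_sum arr low mid high → Pre_cross_subarray_sum arr low mid high → Spec_cross_subarray_sum arr low mid high (cross_subarray_sum arr low mid high)

-- ===== LEMMAS AND PROOFS =====

-- Cumulative sums of vs starting from running total t (the contents of B's `sums` table).
def pvCums (t : Int) (vs : List Int) : List Int :=
  match vs with
  | [] => []
  | v :: r => (t + v) :: pvCums (t + v) r

-- Cumulative (sum, index) pairs over an index list, valuation f.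
def pvCP (t : Int) (f : Int → Int) (l : List Int) : List (Int × Int) :=
  match l with
  | [] => []
  | i :: r => (t + f i, i) :: pvCP (t + f i) f r

-- First-occurrence argmax over (cum-sum, index) pairs, seeded with the first entry: the common reference both ports reach.
def pvBestRec (b m : Int) (P : List (Int × Int)) : Int × Int :=
  match P with
  | [] => (b, m)
  | (s, i) :: t => if s > b then pvBestRec s i t else pvBestRec b m t

theorem pvCums_foldl (vs : List Int) : ∀ (t : Int) (acc : List Int),
    (vs.foldl (fun (p : Int × List Int) v => (p.1 + v, p.2 ++ [p.1 + v])) (t, acc)).2 = acc ++ pvCums t vs := by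
  induction vs with
  | nil => intro t acc; simp [pvCums]
  | cons v r ih => intro t acc; simp [pvCums, List.foldl_cons, ih (t + v) (acc ++ [t + v])]

theorem pvCP_fst (f : Int → Int) (l : List Int) : ∀ t, (pvCP t f l).map (·.1) = pvCums t (l.map f) := by
  induction l with
  | nil => intro t; simp [pvCP, pvCums]
  | cons i r ih => intro t; simp [pvCP, pvCums, ih]

theorem pvCP_snd (f : Int → Int) (l : List Int) : ∀ t, (pvCP t f l).map (·.2) = l := by
  induction l with
  | nil => intro t; simp [pvCP]
  | cons i r ih => intro t; simp [pvCP, ih]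

-- A-side: A's loop from a some-state is pvBestRec over the cumulative pairs.
theorem loopA_some (arr : List Int) (l : List Int) : ∀ (s b m : Int),
    (l.foldl (pvStepA arr) (s, some b, m)).2 =
      (some (pvBestRec b m (pvCP s (fun i => PySem.List.pyGetD arr i 0) l)).1,
       (pvBestRec b m (pvCP s (fun i => PySem.List.pyGetD arr i 0) l)).2) := by
  induction l with
  | nil => intro s b m; simp [pvCP, pvBestRec]
  | cons i r ih =>
    intro s b m
    simp only [List.foldl_cons, pvStepA, pvCP, pvBestRec]
    by_cases h : s + PySem.List.pyGetD arr i 0 > b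
    · simp [h, ih]
    · simp [h, ih]

-- B-side key fact: running max plus first-occurrence index over the cum list equal pvBestRec.
theorem key_max_index (T : List (Int × Int)) : ∀ (s0 i0 : Int),
    (pvBestRec s0 i0 T).1 = (T.map (·.1)).foldl max s0 ∧
    ∃ k : Nat, PySem.List.index? (s0 :: T.map (·.1)) ((T.map (·.1)).foldl max s0) = some k ∧
      (i0 :: T.map (·.2))[k]? = some (pvBestRec s0 i0 T).2 := by
  induction T with
  | nil =>
    intro s0 i0
    refine ⟨by simp [pvBestRec], 0, ?_, by simp [pvBestRec]⟩
    simp only [List.map_nil, List.foldl_nil]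
    rw [PySem.List.index?_cons_self]
  | cons p T2 ih =>
    intro s0 i0
    obtain ⟨s1, i1⟩ := p
    by_cases h : s0 < s1
    · have hmax : max s0 s1 = s1 := by omega
      obtain ⟨hv, k, hidx, hget⟩ := ih s1 i1
      have hM := (PySem.List.le_foldl_max (T2.map (·.1)) s1).1
      have hne : s0 ≠ (T2.map (·.1)).foldl max s1 := by omega
      simp only [List.map_cons, List.foldl_cons, pvBestRec, if_pos h, hmax]
      refine ⟨hv, k + 1, ?_, ?_⟩
      · rw [PySem.List.index?_cons_of_ne _ hne, hidx]; rfl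
      · simpa using hget
    · have hmax : max s0 s1 = s0 := by omega
      obtain ⟨hv, k, hidx, hget⟩ := ih s0 i0
      have hs0le := (PySem.List.le_foldl_max (T2.map (·.1)) s0).1
      simp only [List.map_cons, List.foldl_cons, pvBestRec, if_neg h, hmax]
      refine ⟨hv, ?_⟩
      by_cases hs0 : s0 = (T2.map (·.1)).foldl max s0
      · -- the max is already the seed: first occurrence is position 0 in both lists
        rw [← hs0] at hidx ⊢
        rw [PySem.List.index?_cons_self] at hidx
        have hk : k = 0 := (Option.some.inj hidx).symm
        subst hk
        refine ⟨0, by rw [PySem.List.index?_cons_self], by simpa using hget⟩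
      · -- the max sits strictly inside T2: both indices shift in step
        have hs1 : s1 ≠ (T2.map (·.1)).foldl max s0 := by omega
        rw [PySem.List.index?_cons_of_ne _ hs0] at hidx
        obtain ⟨j, hj, hkj⟩ := Option.map_eq_some_iff.mp hidx
        refine ⟨k + 1, ?_, ?_⟩
        · rw [PySem.List.index?_cons_of_ne _ hs0, PySem.List.index?_cons_of_ne _ hs1, hj]
          simp [← hkj]
        · subst hkj
          simpa using hget

-- B's _best on a non-empty index list equals pvBestRec seeded with the first entry.
theorem pvBestB_cons (f : Int → Int) (i : Int) (t : List Int) :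
    pvBestB ((i :: t).map f) (i :: t) = pvBestRec (f i) i (pvCP (f i) f t) := by
  obtain ⟨hv, k, hidx, hget⟩ := key_max_index (pvCP (f i) f t) (f i) i
  have hsums : (((i :: t).map f).foldl (fun (p : Int × List Int) v => (p.1 + v, p.2 ++ [p.1 + v])) (0, ([] : List Int))).2
      = f i :: (pvCP (f i) f t).map (·.1) := by
    rw [pvCums_foldl]
    simp [pvCums, ← pvCP_fst]
  unfold pvBestB pvSelect
  rw [hsums, PySem.List.max?_id_cons]
  simp only [hidx]
  rw [pvCP_snd f t (f i)] at hget
  have h2 : PySem.List.pyGetD (i :: t) (k : Int) 0 = (pvBestRec (f i) i (pvCP (f i) f t)).2 := by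
    rw [PySem.List.pyGetD_natCast, List.getD_eq_getElem?_getD, hget]; rfl
  rw [h2, ← hv]

-- A's whole loop on a non-empty index list, componentwise.
theorem loopA_cons (arr : List Int) (i : Int) (t : List Int) :
    ((i :: t).foldl (pvStepA arr) (0, none, 0)).2 =
      (some (pvBestRec (PySem.List.pyGetD arr i 0) i (pvCP (PySem.List.pyGetD arr i 0) (fun j => PySem.List.pyGetD arr j 0) t)).1,
       (pvBestRec (PySem.List.pyGetD arr i 0) i (pvCP (PySem.List.pyGetD arr i 0) (fun j => PySem.List.pyGetD arr j 0) t)).2) := by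
  have h1 : (i :: t).foldl (pvStepA arr) (0, none, 0) = t.foldl (pvStepA arr) (PySem.List.pyGetD arr i 0, some (PySem.List.pyGetD arr i 0), i) := by
    simp [List.foldl_cons, pvStepA]
  rw [h1, loopA_some]

-- ===== VERDICT (by name: the statement is the Claim_ definition above) =====
theorem cross_subarray_sum_spec : Claim_equal_cross_subarray_sum := by
  intro arr low mid high _hdom hpre
  obtain ⟨h1, h2, _, _⟩ := hpre
  unfold Spec_cross_subarray_sum cross_subarray_sum cross_subarray_sum_alt
  have hL : PySem.List.pyRange mid (low - 1) (-1) = mid :: PySem.List.pyRange (mid - 1) (low - 1) (-1) :=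
    PySem.List.pyRange_neg_one_cons (by omega)
  have hR := PySem.List.pyRange_one_cons (a := mid + 1) (b := high + 1) (by omega)
  rw [hL, hR]
  simp only [loopA_cons, pvBestB_cons, Option.getD_some]
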